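-- pv_equiv track=rewrite | github.com/lixiekun/flotherm-automation | pdml_tools/pdml_record_dump.py | classify_offset
-- ===== SOURCE A (Python) =====
-- from typing import Any, Dict, Iterable, List, Optional, Sequence
--
-- def classify_offset(offset: int, sections: Dict[str, int]) -> str:
--     if not sections:
--         return "unknown"
--
--     ordered = sorted(sections.items(), key=lambda item: item[1])
--     current = ordered[0][0]
--     for name, start in ordered:
--         if offset >= start:
--             current = name
--         else:
--             break
--     return current
-- ===== SOURCE B (Python) =====
-- def classify_offset(offset: int, sections) -> str:
--     if not sections:
--         return "unknown"
--     best = None       # (name, start) with max start <= offset; last inserted wins on ties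
--     fallback = None   # (name, start) with min start; first inserted wins on ties
--     for name, start in sections.items():
--         if start <= offset and (best is None or best[1] <= start):
--             best = (name, start)
--         if fallback is None or start < fallback[1]:
--             fallback = (name, start)
--     return best[0] if best is not None else fallback[0]
-- ===== Notes on version B (the rewrite author's own statement) =====
-- stated objective: alternative
-- what changed: Replaced sort-then-scan (build a sorted copy of all sections, then walk its prefix) by a single pass that tracks the best qualifying section (max start <= offset, last inserted wins on ties) and the minimum-start fallback (first inserted wins on ties).
import Mathlib
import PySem

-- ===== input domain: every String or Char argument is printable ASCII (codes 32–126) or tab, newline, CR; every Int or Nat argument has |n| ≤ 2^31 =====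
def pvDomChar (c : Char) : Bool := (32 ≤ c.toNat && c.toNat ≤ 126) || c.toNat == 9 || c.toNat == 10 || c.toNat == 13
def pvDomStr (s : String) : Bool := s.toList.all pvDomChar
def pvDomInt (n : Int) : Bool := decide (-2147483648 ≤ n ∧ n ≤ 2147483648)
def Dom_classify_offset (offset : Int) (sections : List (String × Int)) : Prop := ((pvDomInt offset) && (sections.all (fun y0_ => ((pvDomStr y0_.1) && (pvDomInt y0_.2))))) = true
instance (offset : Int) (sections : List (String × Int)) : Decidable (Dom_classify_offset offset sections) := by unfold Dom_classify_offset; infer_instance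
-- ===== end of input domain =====

-- B replaces A's sort-then-scan by one pass tracking the best qualifying section and the
-- minimum-start fallback (objective: alternative — no sorted copy is built; timing was inconclusive).

-- ===== PORT A =====
-- the 'for name, start in ordered: if offset >= start: current = name else: break' loop
def classifyLoop (offset : Int) : List (String × Int) → String → String
  | [], current => current
  | (name, start) :: rest, current =>
      if start ≤ offset then classifyLoop offset rest name else current

def classify_offset (offset : Int) (sections : List (String × Int)) : String :=
  if sections = [] then "unknown"
  else
    let ordered := PySem.List.sorted sections (fun item => item.2) false
    let current := (PySem.List.pyGetD ordered 0 ("", 0)).1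
    classifyLoop offset ordered current

-- ===== PORT B =====
-- 'if start <= offset and (best is None or best[1] <= start): best = (name, start)'
def bestUpd (offset : Int) (best : Option (String × Int)) (x : String × Int) : Option (String × Int) :=
  if x.2 ≤ offset then
    match best with
    | none => some x
    | some b => if b.2 ≤ x.2 then some x else some b
  else best

-- 'if fallback is None or start < fallback[1]: fallback = (name, start)'
def fbUpd (fb : Option (String × Int)) (x : String × Int) : Option (String × Int) :=
  match fb with
  | none => some x
  | some f => if x.2 < f.2 then some x else some f

def classify_offset_alt (offset : Int) (sections : List (String × Int)) : String :=
  if sections = [] then "unknown"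
  else
    let st := sections.foldl (fun st x => (bestUpd offset st.1 x, fbUpd st.2 x)) (none, none)
    match st.1 with
    | some b => b.1
    | none =>
      match st.2 with
      | some f => f.1
      | none => "unknown"   -- unreachable: sections ≠ []

-- ===== PRECONDITION & SPEC =====
def Spec_classify_offset (offset : Int) (sections : List (String × Int)) (out : String) : Prop := out = classify_offset_alt offset sections
instance (offset : Int) (sections : List (String × Int)) (out : String) : Decidable (Spec_classify_offset offset sections out) := by unfold Spec_classify_offset; infer_instance

-- ===== CLAIM (what is proved, stated in full; the proofs are below) =====
def Claim_equal_classify_offset : Prop := ∀ (offset : Int) (sections : List (String × Int)), Dom_classify_offset offset sections → Spec_classify_offset offset sections (classify_offset offset sections)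

-- ===== LEMMAS AND PROOFS =====

-- A's loop on any list returns the name of the last element of the qualifying prefix, else the seed
theorem classifyLoop_eq (offset : Int) (s : List (String × Int)) (c : String) :
    classifyLoop offset s c =
      (match (s.takeWhile (fun p => decide (p.2 ≤ offset))).getLast? with
        | some m => m.1
        | none => c) := by
  induction s generalizing c with
  | nil => rfl
  | cons h t ih =>
    obtain ⟨name, start⟩ := h
    by_cases hq : start ≤ offset
    · simp only [classifyLoop, if_pos hq, List.takeWhile_cons, decide_eq_true hq,
        if_pos trivial, List.getLast?_cons, ih]
      cases (t.takeWhile (fun p => decide (p.2 ≤ offset))).getLast? with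
      | none => simp
      | some m => simp
    · simp only [classifyLoop, if_neg hq, List.takeWhile_cons, decide_eq_false hq]
      simp

-- one insertion step: the head of insertBy is B's fallback update of the head
theorem head_insertBy (x : String × Int) (s : List (String × Int)) :
    (PySem.List.insertBy (fun a b => decide (a.2 < b.2)) x s).head? = fbUpd s.head? x := by
  cases s with
  | nil => rfl
  | cons h t =>
    simp only [PySem.List.insertBy, fbUpd, List.head?_cons]
    by_cases hlt : x.2 < h.2
    · simp [hlt]
    · simp [hlt]

-- one insertion step: the last qualifying element of insertBy is B's best update
theorem lastQual_insertBy (offset : Int) (x : String × Int) (s : List (String × Int))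
    (hs : s.Pairwise (fun a b => a.2 ≤ b.2)) :
    ((PySem.List.insertBy (fun a b => decide (a.2 < b.2)) x s).takeWhile
        (fun p => decide (p.2 ≤ offset))).getLast? =
      bestUpd offset ((s.takeWhile (fun p => decide (p.2 ≤ offset))).getLast?) x := by
  induction s with
  | nil =>
    by_cases hq : x.2 ≤ offset <;>
      simp [PySem.List.insertBy, bestUpd, List.takeWhile, hq]
  | cons h t ih =>
    have hpt : t.Pairwise (fun a b => a.2 ≤ b.2) := (List.pairwise_cons.mp hs).2
    have hht : ∀ y ∈ t, h.2 ≤ y.2 := (List.pairwise_cons.mp hs).1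
    by_cases hlt : x.2 < h.2
    · -- x is inserted in front of h
      have hins : PySem.List.insertBy (fun a b => decide (a.2 < b.2)) x (h :: t)
          = x :: h :: t := by
        simp [PySem.List.insertBy, hlt]
      rw [hins]
      by_cases hq : x.2 ≤ offset
      · by_cases hqh : h.2 ≤ offset
        · -- both qualify: the last of (x :: h :: tw) has key ≥ h.2 > x.2, so best keeps it
          simp only [List.takeWhile_cons, decide_eq_true hq, decide_eq_true hqh, if_pos trivial,
            List.getLast?_cons]
          cases htw : (t.takeWhile (fun p => decide (p.2 ≤ offset))).getLast? with
          | none => simp [bestUpd, hq, not_le.mpr hlt]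
          | some m =>
            have hmem : m ∈ t.takeWhile (fun p => decide (p.2 ≤ offset)) :=
              List.mem_of_getLast? htw
            have hhm : h.2 ≤ m.2 := hht m ((List.takeWhile_sublist _).mem hmem)
            have hxm : ¬ m.2 ≤ x.2 := by omega
            simp [bestUpd, hq, hxm]
        · -- h does not qualify: the qualifying prefix of the new list is just [x]
          simp [hq, hqh, bestUpd]
      · -- x does not qualify, hence neither does h (x.2 < h.2): both sides are none
        have hqh : ¬ h.2 ≤ offset := by omega
        simp [hq, hqh, bestUpd]
    · -- x is inserted after h
      have hins : PySem.List.insertBy (fun a b => decide (a.2 < b.2)) x (h :: t)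
          = h :: PySem.List.insertBy (fun a b => decide (a.2 < b.2)) x t := by
        simp [PySem.List.insertBy, hlt]
      rw [hins]
      by_cases hqh : h.2 ≤ offset
      · simp only [List.takeWhile_cons, decide_eq_true hqh, if_pos trivial,
          List.getLast?_cons, ih hpt]
        cases htw : (t.takeWhile (fun p => decide (p.2 ≤ offset))).getLast? with
        | none =>
          by_cases hq : x.2 ≤ offset
          · simp [bestUpd, hq, not_lt.mp hlt]
          · simp [bestUpd, hq]
        | some m =>
          by_cases hq : x.2 ≤ offset
          · by_cases hmx : m.2 ≤ x.2 <;> simp [bestUpd, hq, hmx]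
          · simp [bestUpd, hq]
      · -- h does not qualify, so neither does x (h.2 ≤ x.2): both sides are none
        have hq : ¬ x.2 ≤ offset := by omega
        simp [hq, hqh, bestUpd]

-- B's single pass computes the last qualifying element and the head of A's sorted list
theorem fold_eq (offset : Int) (xs : List (String × Int)) :
    xs.foldl (fun st x => (bestUpd offset st.1 x, fbUpd st.2 x)) (none, none) =
      (((PySem.List.sorted xs (fun p => p.2) false).takeWhile
          (fun p => decide (p.2 ≤ offset))).getLast?,
        (PySem.List.sorted xs (fun p => p.2) false).head?) := by
  induction xs using List.reverseRecOn with
  | nil => rfl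
  | append_singleton xs x ih =>
    rw [List.foldl_append, List.foldl_cons, List.foldl_nil, ih]
    have hsorted : PySem.List.sorted (xs ++ [x]) (fun p => p.2) false
        = PySem.List.insertBy (fun a b => decide (a.2 < b.2)) x
            (PySem.List.sorted xs (fun p => p.2) false) := by
      rw [PySem.List.sorted_eq_foldl_insertBy (xs ++ [x]) (fun p => p.2),
        PySem.List.sorted_eq_foldl_insertBy xs (fun p => p.2),
        List.foldl_append, List.foldl_cons, List.foldl_nil]
    rw [hsorted, head_insertBy,
      lastQual_insertBy offset x _ (PySem.List.sorted_pairwise xs (fun p => p.2))]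

-- ===== VERDICT (by name: the statement is the Claim_ definition above) =====
theorem classify_offset_spec : Claim_equal_classify_offset := by
  intro offset sections _
  unfold Spec_classify_offset classify_offset classify_offset_alt
  by_cases hnil : sections = []
  · simp [hnil]
  · simp only [if_neg hnil]
    rw [fold_eq]
    have hsne : PySem.List.sorted sections (fun p => p.2) false ≠ [] := by
      rw [Ne, PySem.List.sorted_eq_nil_iff]; exact hnil
    obtain ⟨h, t, hs⟩ := List.exists_cons_of_ne_nil hsne
    rw [hs, classifyLoop_eq]
    cases ((h :: t).takeWhile (fun p => decide (p.2 ≤ offset))).getLast? with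
    | some m => simp
    | none => simp [PySem.List.pyGetD_zero_cons]
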